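-- pv_equiv track=rewrite | github.com/BozorgmehrVaziri/Schreier-graph | nuclus check.py | inverse_reducer
-- ===== SOURCE A (Python) =====
-- def inverse_fun(x):
--     if x==x.upper():
--         y=x.lower()
--     else:
--         y=x.upper()
--     return y
--
-- def super_inverse_fun(w):
--     if len(w)==1:
--         return inverse_fun(w)
--     else:
--         x1=w[0]
--         x2=w[1:]
--         y=super_inverse_fun(x2)+inverse_fun(x1)
--         return y
--
-- def inverse_reducer(list):
--     L=[]
--
--     while len(list) >= 1:
--         L.append(list[0])
--         x = list[0]
--         list.remove(list[0])
--         if super_inverse_fun(x) in list: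
--             list.remove(super_inverse_fun(x))
--     return L
-- ===== SOURCE B (Python) =====
-- # One pass with a pending-cancellation counter: instead of scanning and removing
-- # from the remaining list, each kept word schedules one future occurrence of its
-- # inverse to be skipped. Note: A empties its argument list in place; B does not
-- # mutate it (the equivalence claimed is about the return value only).
-- def inverse_reducer(list):
--     pending = {}
--     L = []
--     for w in list:
--         if pending.get(w, 0) > 0:
--             pending[w] = pending.get(w, 0) - 1
--         else:
--             L.append(w)
--             inv = ''.join(c.lower() if c == c.upper() else c.upper() for c in reversed(w))
--             pending[inv] = pending.get(inv, 0) + 1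
--     return L
-- ===== Notes on version B (the rewrite author's own statement) =====
-- stated objective: faster
-- what changed: Replaces the destructive while-loop that rescans the remaining list and removes the first occurrence of each kept word's inverse with a single left-to-right pass over the unmodified input keeping a dict counter of pending inverse cancellations, so the inner membership scan and list removal disappear; B also does not mutate the argument (A empties it in place).
import Mathlib
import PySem

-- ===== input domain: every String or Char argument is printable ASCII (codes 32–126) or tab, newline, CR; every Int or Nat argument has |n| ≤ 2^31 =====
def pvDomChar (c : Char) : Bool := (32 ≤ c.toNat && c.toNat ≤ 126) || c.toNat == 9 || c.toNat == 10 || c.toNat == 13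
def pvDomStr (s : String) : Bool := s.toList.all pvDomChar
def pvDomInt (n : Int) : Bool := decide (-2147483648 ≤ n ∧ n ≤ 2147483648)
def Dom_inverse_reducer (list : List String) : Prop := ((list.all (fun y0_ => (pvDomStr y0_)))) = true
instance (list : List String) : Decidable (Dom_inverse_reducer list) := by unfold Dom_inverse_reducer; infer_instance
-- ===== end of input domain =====

-- B replaces A's quadratic scan-and-remove loop by one pass with a counter of
-- pending inverse cancellations (measured asymptotically faster). A empties its
-- argument list in place; B does not mutate it — the claim is about the return value.

-- ===== PORT A =====
-- inverse_fun: on a one-char string (as List Char): lower if already upper, else upper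
def inverse_fun (x : List Char) : List Char :=
  if x = PySem.Chars.upper x then PySem.Chars.lower x else PySem.Chars.upper x

-- super_inverse_fun: reverse-and-swap-case by head recursion; Python raises
-- IndexError on "" (w[0]); that input is outside Pre_, here totalised to []
def super_inverse_fun : List Char → List Char
  | [] => []
  | [c] => inverse_fun [c]
  | c :: c' :: rest => super_inverse_fun (c' :: rest) ++ inverse_fun [c]

-- the while-loop: pop the front, append it to L, and if its super-inverse is in
-- the remaining list remove that first occurrence (list.remove)
def invRedLoop : List String → List String → List String
  | L, [] => L
  | L, x :: rest =>
    let inv := String.ofList (super_inverse_fun x.toList)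
    invRedLoop (L ++ [x]) (if inv ∈ rest then ((PySem.List.remove? rest inv).getD rest) else rest)
termination_by _ l => l.length
decreasing_by
  simp only [List.length_cons]
  split
  · rename_i hmem
    rw [PySem.List.remove?_eq_some_erase _ _ hmem]
    have h : (rest.erase (String.ofList (super_inverse_fun x.toList))).length ≤ rest.length :=
      List.length_erase_le
    simp only [Option.getD_some]
    omega
  · omega

def inverse_reducer (list : List String) : List String := invRedLoop [] list

-- ===== PORT B =====
-- c.lower() if c == c.upper() else c.upper()  for a single character c
def pvSwapChar (c : Char) : List Char :=
  if [c] = PySem.Chars.upper [c] then PySem.Chars.lower [c] else PySem.Chars.upper [c]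

-- ''.join(c.lower() if c == c.upper() else c.upper() for c in reversed(w))
def pvInvWord (w : String) : String :=
  String.ofList (w.toList.reverse.flatMap pvSwapChar)

-- one iteration of B's for-loop: state = (L, pending)
def altStep (acc : List String × PySem.Dict String Int) (w : String) :
    List String × PySem.Dict String Int :=
  if 0 < acc.2.getD w 0 then (acc.1, acc.2.insert w (acc.2.getD w 0 - 1))
  else (acc.1 ++ [w], acc.2.insert (pvInvWord w) (acc.2.getD (pvInvWord w) 0 + 1))

def inverse_reducer_alt (list : List String) : List String :=
  (list.foldl altStep ([], PySem.Dict.empty)).1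

-- ===== PRECONDITION & SPEC =====
-- Pre_ excludes lists containing the empty string: Python's A raises IndexError
-- there (super_inverse_fun("") evaluates w[0]); it accepts everything else.
def Pre_inverse_reducer (list : List String) : Prop := "" ∉ list
instance (list : List String) : Decidable (Pre_inverse_reducer list) := by
  unfold Pre_inverse_reducer; infer_instance

def pvWitness_inverse_reducer : List String := ["ab", "BA", "x!"]

def Spec_inverse_reducer (list : List String) (out : List String) : Prop := out = inverse_reducer_alt list
instance (list : List String) (out : List String) : Decidable (Spec_inverse_reducer list out) := by unfold Spec_inverse_reducer; infer_instance

-- ===== CLAIM (what is proved, stated in full; the proofs are below) =====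
def Claim_equal_inverse_reducer : Prop := ∀ (list : List String), Dom_inverse_reducer list → Pre_inverse_reducer list → Spec_inverse_reducer list (inverse_reducer list)

-- ===== LEMMAS AND PROOFS =====

-- A's reverse-and-swap recursion computes B's reversed flatMap of per-char swaps
lemma super_inverse_eq_flatMap : ∀ cs : List Char,
    super_inverse_fun cs = cs.reverse.flatMap pvSwapChar := by
  intro cs
  induction cs with
  | nil => rfl
  | cons c rest ih =>
    cases rest with
    | nil => simp [super_inverse_fun, pvSwapChar, inverse_fun]
    | cons c' rest' =>
      simp only [super_inverse_fun, ih, List.reverse_cons, List.flatMap_append]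
      simp [pvSwapChar, inverse_fun]

lemma inv_word_eq (x : String) :
    String.ofList (super_inverse_fun x.toList) = pvInvWord x := by
  rw [pvInvWord, super_inverse_eq_flatMap]

-- the remaining list as B sees it: A's current list is the not-yet-scanned suffix
-- with, for each value v, the first (f v) occurrences skipped
def consume (f : String → Int) : List String → List String
  | [] => []
  | x :: r =>
    if 0 < f x then consume (fun v => if v = x then f x - 1 else f v) r
    else x :: consume f r

lemma consume_cons (f : String → Int) (x : String) (r : List String) :
    consume f (x :: r) =
      if 0 < f x then consume (fun v => if v = x then f x - 1 else f v) r
      else x :: consume f r := rfl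

lemma consume_congr : ∀ (l : List String) (f g : String → Int), (∀ u, f u = g u) →
    consume f l = consume g l := by
  intro l
  induction l with
  | nil => intro f g _; rfl
  | cons x r ih =>
    intro f g h
    rw [consume_cons, consume_cons, h x]
    split
    · exact ih _ _ (by intro u; by_cases hu : u = x <;> simp [hu, h u])
    · rw [ih _ _ h]

-- scheduling one more cancellation of v = removing the first surviving occurrence of v
lemma consume_bump (v : String) : ∀ (r : List String) (f : String → Int), (∀ u, 0 ≤ f u) →
    consume (fun u => if u = v then f v + 1 else f u) r =
      if v ∈ consume f r then (consume f r).erase v else consume f r := by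
  intro r
  induction r with
  | nil => intro f _; simp [consume]
  | cons x r' ih =>
    intro f hf
    by_cases hxv : x = v
    · subst hxv
      -- the scheduled extra cancellation is consumed by this very occurrence of x
      have hL : consume (fun u => if u = x then f x + 1 else f u) (x :: r') = consume f r' := by
        rw [consume_cons]
        have hgx : (if x = x then f x + 1 else f x) = f x + 1 := if_pos rfl
        rw [if_pos (by rw [hgx]; have := hf x; omega)]
        exact consume_congr _ _ _ (by intro u; by_cases hu : u = x <;> simp [hu])
      rw [hL]
      by_cases hfx : 0 < f x
      · -- RHS also consumes a (previously scheduled) cancellation here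
        have hR : consume f (x :: r') =
            consume (fun u => if u = x then f x - 1 else f u) r' := by
          rw [consume_cons, if_pos hfx]
        rw [hR]
        have h := ih (fun u => if u = x then f x - 1 else f u)
          (by intro u; by_cases hu : u = x
              · simp [hu]; have := hf x; omega
              · simp [hu]; exact hf u)
        calc consume f r'
            = consume (fun u => if u = x then (if x = x then f x - 1 else f x) + 1
                      else (if u = x then f x - 1 else f u)) r' :=
              consume_congr _ _ _ (by intro u; by_cases hu : u = x <;> simp [hu])
          _ = _ := h
      · have hR : consume f (x :: r') = x :: consume f r' := by
          rw [consume_cons, if_neg hfx]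
        rw [hR]
        simp [List.erase_cons_head]
    · have hgx : (if x = v then f v + 1 else f x) = f x := by simp [hxv]
      by_cases hfx : 0 < f x
      · have hL : consume (fun u => if u = v then f v + 1 else f u) (x :: r') =
            consume (fun u => if u = v then (if v = x then f x - 1 else f v) + 1
                     else (if u = x then f x - 1 else f u)) r' := by
          rw [consume_cons]
          rw [if_pos (by rw [hgx]; exact hfx)]
          refine consume_congr _ _ _ ?_
          intro u
          by_cases hu : u = v
          · subst hu; simp [Ne.symm hxv]
          · by_cases hux : u = x <;> simp [hu, hux, hxv]
        have hR : consume f (x :: r') =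
            consume (fun u => if u = x then f x - 1 else f u) r' := by
          rw [consume_cons, if_pos hfx]
        rw [hL, hR]
        exact ih (fun u => if u = x then f x - 1 else f u)
          (by intro u; by_cases hu : u = x
              · simp [hu]; have := hf x; omega
              · simp [hu]; exact hf u)
      · have hL : consume (fun u => if u = v then f v + 1 else f u) (x :: r') =
            x :: consume (fun u => if u = v then f v + 1 else f u) r' := by
          rw [consume_cons]
          rw [if_neg (by rw [hgx]; exact hfx)]
        have hR : consume f (x :: r') = x :: consume f r' := by
          rw [consume_cons, if_neg hfx]
        rw [hL, hR, ih f hf]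
        by_cases hmem : v ∈ consume f r'
        · rw [if_pos hmem, if_pos (List.mem_cons_of_mem _ hmem),
              List.erase_cons_tail (by simp [hxv])]
        · rw [if_neg hmem, if_neg (by simp [hmem, Ne.symm hxv])]

-- main loop correspondence: A's loop on the surviving suffix = B's fold
lemma loop_eq : ∀ (l L : List String) (p : PySem.Dict String Int) (f : String → Int),
    (∀ u, p.getD u 0 = f u) → (∀ u, 0 ≤ f u) →
    invRedLoop L (consume f l) = (l.foldl altStep (L, p)).1 := by
  intro l
  induction l with
  | nil => intro L p f _ _; simp [consume, invRedLoop]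
  | cons x r ih =>
    intro L p f hpf hf
    by_cases hfx : 0 < f x
    · have hstep : altStep (L, p) x = (L, p.insert x (p.getD x 0 - 1)) := by
        simp only [altStep]; simp [hpf x, hfx]
      have hc : consume f (x :: r) = consume (fun v => if v = x then f x - 1 else f v) r := by
        rw [consume_cons]; simp [hfx]
      rw [hc, List.foldl_cons, hstep]
      exact ih L (p.insert x (p.getD x 0 - 1)) _
        (by intro u
            rw [PySem.Dict.getD_insert]
            by_cases hu : u = x <;> simp [hu, hpf u, hpf x])
        (by intro u; by_cases hu : u = x
            · simp [hu]; have := hf x; omega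
            · simp [hu]; exact hf u)
    · have hstep : altStep (L, p) x =
          (L ++ [x], p.insert (pvInvWord x) (p.getD (pvInvWord x) 0 + 1)) := by
        simp only [altStep]; simp [hpf x, hfx]
      have hc : consume f (x :: r) = x :: consume f r := by
        rw [consume_cons]; simp [hfx]
      rw [hc, List.foldl_cons, hstep, invRedLoop]
      simp only [inv_word_eq]
      have hrest : (if pvInvWord x ∈ consume f r
            then (PySem.List.remove? (consume f r) (pvInvWord x)).getD (consume f r)
            else consume f r) = consume (fun u => if u = pvInvWord x then f (pvInvWord x) + 1 else f u) r := by
        rw [consume_bump _ _ _ hf]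
        by_cases hmem : pvInvWord x ∈ consume f r
        · rw [if_pos hmem, if_pos hmem, PySem.List.remove?_eq_some_erase _ _ hmem]
          rfl
        · simp [hmem]
      rw [hrest]
      exact ih (L ++ [x]) (p.insert (pvInvWord x) (p.getD (pvInvWord x) 0 + 1)) _
        (by intro u
            rw [PySem.Dict.getD_insert]
            by_cases hu : u = pvInvWord x <;> simp [hu, hpf u, hpf (pvInvWord x)])
        (by intro u; by_cases hu : u = pvInvWord x
            · simp [hu]; have := hf (pvInvWord x); omega
            · simp [hu]; exact hf u)

lemma consume_zero : ∀ l : List String, consume (fun _ => 0) l = l := by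
  intro l
  induction l with
  | nil => rfl
  | cons x r ih => rw [consume_cons]; simp [ih]

-- ===== VERDICT (by name: the statement is the Claim_ definition above) =====
theorem inverse_reducer_spec : Claim_equal_inverse_reducer := by
  intro list _ _
  unfold Spec_inverse_reducer inverse_reducer inverse_reducer_alt
  have h := loop_eq list [] PySem.Dict.empty (fun _ => 0)
    (by intro u; simp [PySem.Dict.getD_empty]) (by intro u; simp)
  rw [consume_zero list] at h
  exact h
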